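-- pv_equiv track=rewrite | github.com/ksew1/Introduction-to-Computer-Science-course | zestaw 2/zadanie_14.py | count_0_1
-- ===== SOURCE A (Python) =====
-- def count_0_1(b, len0, len1):
--     c0 = 0
--     c1 = 0
--     while b > 0:
--         if b % 10 == 1:
--             c1 += 1
--
--         else:
--             c0 += 1
--         b //= 10
--
--     if c0 == len0 and c1 == len1:
--         return True
--     else:
--         return False
-- ===== SOURCE B (Python) =====
-- def count_0_1(b, len0, len1):
--     if b <= 0:
--         c0, c1 = 0, 0
--     else:
--         s = str(b)
--         c1 = s.count("1")
--         c0 = len(s) - c1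
--     return c0 == len0 and c1 == len1
-- ===== Notes on version B (the rewrite author's own statement) =====
-- stated objective: idiomatic
-- what changed: Replaces the manual divmod-by-10 counting loop with counting on the decimal string: c1 = str(b).count('1') and c0 = len(str(b)) - c1 (with the b <= 0 case giving zero counts, as A's loop never runs there).
import Mathlib
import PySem

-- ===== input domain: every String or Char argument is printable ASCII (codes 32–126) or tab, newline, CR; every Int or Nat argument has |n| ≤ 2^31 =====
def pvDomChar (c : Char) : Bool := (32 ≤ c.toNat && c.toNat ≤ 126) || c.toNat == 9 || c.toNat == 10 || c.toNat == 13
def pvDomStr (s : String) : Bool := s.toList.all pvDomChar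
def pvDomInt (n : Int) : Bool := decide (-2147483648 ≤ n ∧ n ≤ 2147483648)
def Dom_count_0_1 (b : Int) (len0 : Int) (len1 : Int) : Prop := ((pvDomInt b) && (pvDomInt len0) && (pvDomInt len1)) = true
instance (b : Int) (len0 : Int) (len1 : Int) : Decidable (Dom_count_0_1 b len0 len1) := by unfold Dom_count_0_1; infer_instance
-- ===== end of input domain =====

-- B replaces A's divmod-by-10 counting loop by counting '1' digits on the decimal string str(b) (same results; idiomatic rewrite).


-- ===== PORT A =====
def countLoop_count_0_1 (b : Int) (c0 : Int) (c1 : Int) : Int × Int :=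
  if h : b > 0 then
    if PySem.Int.mod b 10 = 1 then
      countLoop_count_0_1 (PySem.Int.floordiv b 10) c0 (c1 + 1)
    else
      countLoop_count_0_1 (PySem.Int.floordiv b 10) (c0 + 1) c1
  else
    (c0, c1)
termination_by b.toNat
decreasing_by
  all_goals
    rw [PySem.Int.floordiv_eq_ediv_of_pos (by omega)]
    omega

def count_0_1 (b : Int) (len0 : Int) (len1 : Int) : Bool :=
  let p := countLoop_count_0_1 b 0 0
  if p.1 = len0 ∧ p.2 = len1 then true else false

-- ===== PORT B =====
def count_0_1_alt (b : Int) (len0 : Int) (len1 : Int) : Bool :=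
  let p : Int × Int :=
    if b ≤ 0 then (0, 0)
    else
      let s := PySem.Int.toStr b
      let c1 : Int := (PySem.Str.count s "1" : Int)
      (PySem.Str.len s - c1, c1)
  decide (p.1 = len0) && decide (p.2 = len1)

-- ===== PRECONDITION & SPEC =====
def Spec_count_0_1 (b : Int) (len0 : Int) (len1 : Int) (out : Bool) : Prop := out = count_0_1_alt b len0 len1
instance (b : Int) (len0 : Int) (len1 : Int) (out : Bool) : Decidable (Spec_count_0_1 b len0 len1 out) := by unfold Spec_count_0_1; infer_instance

-- ===== CLAIM (what is proved, stated in full; the proofs are below) =====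
def Claim_equal_count_0_1 : Prop := ∀ (b : Int) (len0 : Int) (len1 : Int), Dom_count_0_1 b len0 len1 → Spec_count_0_1 b len0 len1 (count_0_1 b len0 len1)

-- ===== LEMMAS AND PROOFS =====

-- digitChar is '1' exactly for digit 1
lemma digitChar_eq_one_iff (d : Nat) (h : d < 10) : Nat.digitChar d = '1' ↔ d = 1 := by
  interval_cases d <;> simp [Nat.digitChar]

-- Chars.count.go with a single-character pattern counts that character
lemma chars_count_go_singleton (c : Char) :
    ∀ (fuel : Nat) (l : List Char) (acc : Nat), l.length ≤ fuel →
      PySem.Chars.count.go [c] fuel l acc = acc + l.count c := by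
  intro fuel
  induction fuel with
  | zero =>
    intro l acc h
    cases l with
    | nil => simp [PySem.Chars.count.go]
    | cons x t => simp at h
  | succ f ih =>
    intro l acc h
    cases l with
    | nil => simp [PySem.Chars.count.go]
    | cons x t =>
      have hlen : t.length ≤ f := by simpa using h
      simp only [PySem.Chars.count.go]
      by_cases hx : c = x
      · subst hx
        rw [if_pos (by simp [List.isPrefixOf])]
        simp only [List.length_singleton, List.drop_succ_cons, List.drop_zero]
        rw [ih t (acc + 1) hlen]
        have : (c :: t).count c = t.count c + 1 := by simp
        omega
      · rw [if_neg (by simp [List.isPrefixOf, hx])]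
        rw [ih t acc hlen]
        have hxc : ¬ x = c := fun h => hx h.symm
        have : (x :: t).count c = t.count c := by
          simp [hxc]
        omega

-- Chars.count with a single-character needle is List.count
lemma chars_count_singleton (l : List Char) (c : Char) :
    PySem.Chars.count l [c] = l.count c := by
  rw [PySem.Chars.count]
  simp only [List.isEmpty_cons, Bool.false_eq_true, if_false]
  rw [chars_count_go_singleton c l.length l 0 (le_refl _)]
  exact Nat.zero_add _

-- A's divmod loop computes the digit counts of Nat.toDigits 10 n
lemma countLoop_eq (n : Nat) (hn : 0 < n) : ∀ (c0 c1 : Int),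
    countLoop_count_0_1 (n : Int) c0 c1 =
      (c0 + ((Nat.toDigits 10 n).length : Int) - ((Nat.toDigits 10 n).count '1' : Int),
       c1 + ((Nat.toDigits 10 n).count '1' : Int)) := by
  induction n using Nat.strong_induction_on with
  | _ n ih =>
    intro c0 c1
    rw [countLoop_count_0_1]
    have hpos : ((n : Int) > 0) := by exact_mod_cast hn
    rw [dif_pos hpos]
    have hmod : PySem.Int.mod (n : Int) 10 = ((n % 10 : Nat) : Int) := by
      exact_mod_cast PySem.Int.mod_natCast n 10
    have hdiv : PySem.Int.floordiv (n : Int) 10 = ((n / 10 : Nat) : Int) := by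
      exact_mod_cast PySem.Int.floordiv_natCast n 10
    have hmlt : n % 10 < 10 := Nat.mod_lt _ (by omega)
    by_cases hsmall : n < 10
    · have h10 : n / 10 = 0 := Nat.div_eq_of_lt hsmall
      have hbase : Nat.toDigits 10 n = [Nat.digitChar n] := Nat.toDigits_of_lt_base hsmall
      have hself : n % 10 = n := Nat.mod_eq_of_lt hsmall
      have hstop : ∀ a b : Int, countLoop_count_0_1 ((0 : Nat) : Int) a b = (a, b) := by
        intro a b; rw [countLoop_count_0_1]; norm_num
      by_cases h1 : n = 1
      · subst h1
        rw [hmod, hdiv, if_pos (by norm_num), h10, hstop]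
        have hc : List.count '1' [Nat.digitChar 1] = 1 := by decide
        rw [hbase, hc]
        simp only [Prod.mk.injEq, List.length_singleton]
        omega
      · have hne : ¬ (PySem.Int.mod (n : Int) 10 = 1) := by rw [hmod, hself]; omega
        rw [if_neg hne, hdiv, h10, hstop]
        have hch : Nat.digitChar n ≠ '1' := fun h =>
          h1 ((digitChar_eq_one_iff n hsmall).mp h)
        have hc : List.count '1' [Nat.digitChar n] = 0 :=
          List.count_eq_zero.mpr (by simp; exact fun h => hch h.symm)
        rw [hbase, hc]
        simp only [Prod.mk.injEq, List.length_singleton]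
        omega
    · have h10 : 10 ≤ n := le_of_not_gt hsmall
      have hdpos : 0 < n / 10 := Nat.div_pos h10 (by omega)
      have hdlt : n / 10 < n := Nat.div_lt_self hn (by omega)
      have hrec : Nat.toDigits 10 n =
          Nat.toDigits 10 (n / 10) ++ [Nat.digitChar (n % 10)] :=
        Nat.toDigits_of_base_le (by norm_num) h10
      have hch := digitChar_eq_one_iff (n % 10) hmlt
      have hcnt : (Nat.toDigits 10 n).count '1'
          = (Nat.toDigits 10 (n / 10)).count '1' + [Nat.digitChar (n % 10)].count '1' := by
        rw [hrec, List.count_append]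
      have hlen : (Nat.toDigits 10 n).length
          = (Nat.toDigits 10 (n / 10)).length + 1 := by
        rw [hrec, List.length_append, List.length_singleton]
      by_cases h1 : n % 10 = 1
      · have hdig : [Nat.digitChar (n % 10)].count '1' = 1 := by
          rw [hch.mpr h1]; decide
        rw [hmod, hdiv, if_pos (by exact_mod_cast h1), ih (n / 10) hdlt hdpos,
          hcnt, hlen, hdig]
        simp only [Prod.mk.injEq]
        omega
      · have hne : ¬ (PySem.Int.mod (n : Int) 10 = 1) := by rw [hmod]; omega
        have hdig : [Nat.digitChar (n % 10)].count '1' = 0 :=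
          List.count_eq_zero.mpr (by simp; exact fun h => h1 (hch.mp h.symm)) 
        rw [if_neg hne, hdiv, ih (n / 10) hdlt hdpos, hcnt, hlen, hdig]
        simp only [Prod.mk.injEq]
        omega

-- ===== VERDICT (by name: the statement is the Claim_ definition above) =====
theorem count_0_1_spec : Claim_equal_count_0_1 := by
  intro b len0 len1 _
  unfold Spec_count_0_1 count_0_1 count_0_1_alt
  by_cases hb : b ≤ 0
  · have hloop : countLoop_count_0_1 b 0 0 = (0, 0) := by
      rw [countLoop_count_0_1]; rw [dif_neg (by omega)]
    rw [hloop, if_pos hb]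
    by_cases h0 : (0 : Int) = len0 <;> by_cases h1 : (0 : Int) = len1 <;>
      simp [h0, h1]
  · obtain ⟨n, rfl⟩ : ∃ n : Nat, b = (n : Int) := ⟨b.toNat, by omega⟩
    have hnpos : 0 < n := by omega
    rw [if_neg hb]
    have hlist : (PySem.Int.toStr (n : Int)).toList = Nat.toDigits 10 n := by
      rw [PySem.Int.toList_toStr, PySem.Int.toChars, if_neg (by omega)]
      simp
    have hcount : ((PySem.Str.count (PySem.Int.toStr (n : Int)) "1" : Nat) : Int)
        = ((Nat.toDigits 10 n).count '1' : Int) := by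
      rw [PySem.Str.count_eq, hlist, show ("1".toList) = ['1'] from rfl,
        chars_count_singleton]
    have hlen : PySem.Str.len (PySem.Int.toStr (n : Int))
        = ((Nat.toDigits 10 n).length : Int) := by
      rw [PySem.Str.len_eq, hlist]
    rw [countLoop_eq n hnpos 0 0]
    simp only [hcount, hlen, zero_add]
    by_cases h0 : ((Nat.toDigits 10 n).length : Int)
        - ((Nat.toDigits 10 n).count '1' : Int) = len0 <;>
      by_cases h1 : (((Nat.toDigits 10 n).count '1' : Nat) : Int) = len1 <;>
      simp [h0, h1]
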